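-- pv_equiv track=rewrite | github.com/AlgorithmCodingStudy/Solution | 20200508_programmers_kakao/stepping_stone.py | solution
-- ===== SOURCE A (Python) =====
-- def solution(stones, k):
--     answer, finish = -1, False
--     while not finish:
--         cnt = 0
--         for i, st in enumerate(stones):
--             if st == 0:
--                 cnt += 1
--                 if cnt > k-1:
--                     finish = True
--                     break
--             else:
--                 cnt = 0
--                 stones[i] -= 1
--         answer += 1
--     return answer
-- ===== SOURCE B (Python) =====
-- def solution(stones, k):
--     # Binary search for the smallest number of people after which some k
--     # consecutive stones are all gone.  A stone holding s more steps is gone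
--     # once s people have crossed; a stone recorded with a negative count never
--     # reaches zero, so it never goes.
--     def blocked(people):
--         run = 0
--         for s in stones:
--             if 0 <= s <= people:
--                 run += 1
--                 if run >= k:
--                     return True
--             else:
--                 run = 0
--         return False
--
--     lo, hi = 0, max(stones)
--     while lo < hi:
--         mid = (lo + hi) // 2
--         if blocked(mid):
--             hi = mid
--         else:
--             lo = mid + 1
--     return lo
-- ===== Notes on version B (the rewrite author's own statement) =====
-- stated objective: alternative
-- what changed: A simulates person after person, decrementing every stone once per round until it meets k consecutive zeros; B binary-searches the smallest number of people for which a linear scan finds a run of k gone stones. Pre_ excludes exactly the inputs on which A never returns (no run of max(k,1) consecutive nonnegative stones), where B's binary search has nothing to find.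
import Mathlib
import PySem

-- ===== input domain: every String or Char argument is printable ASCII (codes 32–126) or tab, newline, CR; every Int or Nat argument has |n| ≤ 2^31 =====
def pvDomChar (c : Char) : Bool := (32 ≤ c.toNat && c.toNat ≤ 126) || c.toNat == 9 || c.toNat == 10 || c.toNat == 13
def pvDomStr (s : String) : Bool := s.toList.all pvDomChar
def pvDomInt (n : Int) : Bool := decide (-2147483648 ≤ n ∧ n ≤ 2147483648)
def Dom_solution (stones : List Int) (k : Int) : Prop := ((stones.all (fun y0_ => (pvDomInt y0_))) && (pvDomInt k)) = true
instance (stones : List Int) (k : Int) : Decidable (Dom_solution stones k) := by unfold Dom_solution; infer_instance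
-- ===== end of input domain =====

-- B replaces A's person-by-person simulation by a binary search on the answer
-- with a linear run scan (objective: alternative algorithm). A mutates `stones`
-- in place while B does not; the equivalence proved here is about the RETURN
-- value only.

-- ===== PORT A =====
-- inner for-loop over `enumerate(stones)`: returns the updated stones and the `finish` flag
def innerA : List Int → Int → Int → (List Int × Bool)
  | [], _, _ => ([], false)
  | st :: rest, cnt, k =>
    if st = 0 then
      if cnt + 1 > k - 1 then (st :: rest, true)
      else
        let r := innerA rest (cnt + 1) k
        (st :: r.1, r.2)
    else
      let r := innerA rest 0 k
      ((st - 1) :: r.1, r.2)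

-- the `while not finish` loop; fuel only makes the recursion total — Pre_solution
-- guarantees the loop finishes within (max stone)+2 rounds, so the fuel is never exhausted
def loopA : Nat → List Int → Int → Int → Int
  | 0, _, _, answer => answer
  | fuel + 1, stones, k, answer =>
    let r := innerA stones 0 k
    if r.2 then answer + 1 else loopA fuel r.1 k (answer + 1)

def solution (stones : List Int) (k : Int) : Int :=
  loopA ((stones.foldl (fun a s => max a s) 0).toNat + 2) stones k (-1)

-- ===== PORT B =====
-- `blocked(people)`: the for-loop with its running count of consecutive gone stones
def goB (k people : Int) : List Int → Int → Bool
  | [], _ => false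
  | s :: rest, run =>
    if 0 ≤ s ∧ s ≤ people then
      if run + 1 ≥ k then true else goB k people rest (run + 1)
    else goB k people rest 0

-- the `while lo < hi` binary search; fuel only makes the recursion total — the
-- loop runs at most hi - lo + 1 times, so the fuel solution_alt passes is never exhausted
def bsearchB : Nat → List Int → Int → Int → Int → Int
  | 0, _, _, lo, _ => lo
  | fuel + 1, stones, k, lo, hi =>
    if lo < hi then
      let mid := PySem.Int.floordiv (lo + hi) 2
      if goB k mid stones 0 then bsearchB fuel stones k lo mid
      else bsearchB fuel stones k (mid + 1) hi
    else lo

-- max(stones): Python raises ValueError on []; the `.getD 0` arm is unreachable under Pre_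
def solution_alt (stones : List Int) (k : Int) : Int :=
  let hi := (PySem.List.max? stones (fun s => s)).getD 0
  bsearchB (hi.toNat + 1) stones k 0 hi

-- ===== PRECONDITION & SPEC =====
-- Pre_ excludes exactly the inputs on which A never returns: those without any
-- all-nonnegative run of max(k,1) consecutive stones, on which A loops forever.
def Pre_solution (stones : List Int) (k : Int) : Prop :=
  ∃ i < stones.length + 1,
    i + max k.toNat 1 ≤ stones.length ∧ ∀ s ∈ (stones.drop i).take (max k.toNat 1), 0 ≤ s
instance (stones : List Int) (k : Int) : Decidable (Pre_solution stones k) := by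
  unfold Pre_solution; infer_instance

def pvWitness_solution : List Int × Int := ([2, 0, 1], 2)

def Spec_solution (stones : List Int) (k : Int) (out : Int) : Prop := out = solution_alt stones k
instance (stones : List Int) (k : Int) (out : Int) : Decidable (Spec_solution stones k out) := by
  unfold Spec_solution; infer_instance

-- ===== CLAIM (what is proved, stated in full; the proofs are below) =====
def Claim_equal_solution : Prop := ∀ (stones : List Int) (k : Int), Dom_solution stones k → Pre_solution stones k → Spec_solution stones k (solution stones k)

-- ===== LEMMAS AND PROOFS =====

def step1 (s : Int) : Int := if s = 0 then s else s - 1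

-- the value of stone s after r full rounds of A's loop
def decay (r : Nat) (s : Int) : Int := if s < 0 then s - r else max (s - r) 0

-- the length-K window starting at i
def winL (stones : List Int) (K i : Nat) : List Int := (stones.drop i).take K

def wmax : List Int → Int
  | [] => 0
  | x :: t => t.foldl max x

-- candidate block counts: one per all-nonnegative window
def cands (stones : List Int) (K : Nat) : List Int :=
  (List.range (stones.length - K + 1)).filterMap (fun i =>
    if (winL stones K i).all (fun s => decide (0 ≤ s)) then some (wmax (winL stones K i)) else none)

lemma mem_foldl_max (t : List Int) (c : Int) : t.foldl max c ∈ c :: t := by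
  induction t generalizing c with
  | nil => simp
  | cons x t ih =>
    have h := ih (max c x)
    rw [List.foldl_cons]
    rcases List.mem_cons.1 h with h | h
    · rcases max_choice c x with hc | hc <;> rw [h, hc] <;> simp
    · exact List.mem_cons.2 (Or.inr (List.mem_cons.2 (Or.inr h)))

lemma le_foldl_max_of_mem (t : List Int) (c x : Int) (hx : x ∈ c :: t) : x ≤ t.foldl max c := by
  induction t generalizing c x with
  | nil => simp at hx; simp [hx]
  | cons y t ih =>
    rw [List.foldl_cons]
    have hhead : max c y ≤ t.foldl max (max c y) := ih (max c y) (max c y) (List.mem_cons_self)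
    rcases List.mem_cons.1 hx with h | h
    · subst h; exact le_trans (le_max_left x y) hhead
    · rcases List.mem_cons.1 h with h | h
      · subst h; exact le_trans (le_max_right c x) hhead
      · exact ih (max c y) x (List.mem_cons.2 (Or.inr h))

lemma mem_foldl_min (t : List Int) (c : Int) : t.foldl min c ∈ c :: t := by
  induction t generalizing c with
  | nil => simp
  | cons x t ih =>
    have h := ih (min c x)
    rw [List.foldl_cons]
    rcases List.mem_cons.1 h with h | h
    · rcases min_choice c x with hc | hc <;> rw [h, hc] <;> simp
    · exact List.mem_cons.2 (Or.inr (List.mem_cons.2 (Or.inr h)))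

lemma foldl_min_le_of_mem (t : List Int) (c x : Int) (hx : x ∈ c :: t) : t.foldl min c ≤ x := by
  induction t generalizing c x with
  | nil => simp at hx; simp [hx]
  | cons y t ih =>
    rw [List.foldl_cons]
    have hhead : t.foldl min (min c y) ≤ min c y := ih (min c y) (min c y) (List.mem_cons_self)
    rcases List.mem_cons.1 hx with h | h
    · subst h; exact le_trans hhead (min_le_left x y)
    · rcases List.mem_cons.1 h with h | h
      · subst h; exact le_trans hhead (min_le_right c x)
      · exact ih (min c y) x (List.mem_cons.2 (Or.inr h))

lemma decay_zero (s : Int) : decay 0 s = s := by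
  unfold decay; split <;> omega

lemma step1_decay (r : Nat) (s : Int) : step1 (decay r s) = decay (r + 1) s := by
  unfold step1 decay; push_cast; split_ifs <;> omega

lemma decay_eq_zero_iff (r : Nat) (s : Int) : decay r s = 0 ↔ 0 ≤ s ∧ s ≤ (r : Int) := by
  unfold decay; split <;> omega

lemma innerA_flag (k : Int) (K : Nat)
    (hcond : ∀ c : Int, 0 ≤ c → (c + 1 > k - 1 ↔ (K : Int) ≤ c + 1)) (hK : 1 ≤ K) :
    ∀ (c : List Int) (cnt : Nat), cnt < K →
      ((innerA c (cnt : Int) k).2 = true ↔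
        (∃ m : Nat, m ≤ c.length ∧ (∀ s ∈ c.take m, s = 0) ∧ K ≤ cnt + m) ∨
        (∃ i : Nat, i + K ≤ c.length ∧ ∀ s ∈ (c.drop i).take K, s = 0)) := by
  intro c
  induction c with
  | nil =>
    intro cnt hcnt
    simp only [innerA]
    constructor
    · intro h; simp at h
    · rintro (⟨m, hm, _, hKm⟩ | ⟨i, hi, _⟩)
      · simp at hm; omega
      · simp at hi; omega
  | cons st rest ih =>
    intro cnt hcnt
    by_cases h0 : st = 0
    · have hKiff := hcond (cnt : Int) (by omega)
      by_cases htr : (cnt : Int) + 1 > k - 1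
      · -- trigger: flag true; witness m = 1
        have hKle : K ≤ cnt + 1 := by
          have := hKiff.1 htr; omega
        simp only [innerA, if_pos h0, if_pos htr]
        constructor
        · intro _
          left
          exact ⟨1, by simp, by simp [h0], by omega⟩
        · intro _; trivial
      · have hc1 : cnt + 1 < K := by
          have := hKiff.2; omega
        have hcast : (cnt : Int) + 1 = ((cnt + 1 : Nat) : Int) := by push_cast; ring
        simp only [innerA, if_pos h0, if_neg htr]
        rw [hcast, ih (cnt + 1) hc1]
        constructor
        · rintro (⟨m', hm', hz', hKm'⟩ | ⟨i', hi', hz'⟩)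
          · left
            refine ⟨m' + 1, by simpa using hm', ?_, by omega⟩
            intro s hs
            rw [List.take_succ_cons] at hs
            rcases List.mem_cons.1 hs with h | h
            · rw [h]; exact h0
            · exact hz' s h
          · right
            exact ⟨i' + 1, by simp; omega, by simpa using hz'⟩
        · rintro (⟨m, hm, hz, hKm⟩ | ⟨i, hi, hz⟩)
          · match m, hKm with
            | m' + 1, _ =>
              left
              refine ⟨m', by simp at hm; omega, ?_, by omega⟩
              intro s hs
              exact hz s (by rw [List.take_succ_cons]; exact List.mem_cons.2 (Or.inr hs))
            | 0, h => omega
          · match i with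
            | 0 =>
              left
              refine ⟨K - 1, by simp at hi ⊢; omega, ?_, by omega⟩
              intro s hs
              apply hz s
              simp only [List.drop_zero]
              have : rest.take (K - 1) = (rest.take (K - 1 + 1)).take (K - 1 + 1 - 1) := by
                simp [List.take_take]
              rcases K, hK with _ | ⟨K'⟩
              · omega
              · simp only [List.take_succ_cons]
                exact List.mem_cons.2 (Or.inr (by simpa using hs))
            | i' + 1 =>
              right
              exact ⟨i', by simp at hi; omega, by simpa using hz⟩
    · simp only [innerA, if_neg h0]
      rw [show (0 : Int) = ((0 : Nat) : Int) by rfl, ih 0 (by omega)]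
      constructor
      · rintro (⟨m', hm', hz', hKm'⟩ | ⟨i', hi', hz'⟩)
        · right
          refine ⟨1, by simp; omega, ?_⟩
          intro s hs
          simp only [List.drop_succ_cons, List.drop_zero] at hs
          apply hz' s
          have : rest.take K = (rest.take m').take K := by
            rw [List.take_take]; congr 1; omega
          rw [this] at hs
          exact List.take_subset _ _ hs
        · right
          exact ⟨i' + 1, by simp; omega, by simpa using hz'⟩
      · rintro (⟨m, hm, hz, hKm⟩ | ⟨i, hi, hz⟩)
        · match m, hKm with
          | 0, h => omega
          | m' + 1, _ =>
            exact absurd (hz st (by rw [List.take_succ_cons]; exact List.mem_cons_self)) h0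
        · match i with
          | 0 =>
            rcases K, hK with _ | ⟨K'⟩
            · omega
            · exact absurd (hz st (by simp [List.take_succ_cons])) h0
          | i' + 1 =>
            right
            exact ⟨i', by simp at hi; omega, by simpa using hz⟩

lemma innerA_stones (k : Int) :
    ∀ (c : List Int) (cnt : Int), (innerA c cnt k).2 = false →
      (innerA c cnt k).1 = c.map step1 := by
  intro c
  induction c with
  | nil => intro cnt _; simp [innerA]
  | cons st rest ih =>
    intro cnt hf
    by_cases h0 : st = 0
    · by_cases htr : cnt + 1 > k - 1
      · simp [innerA, h0, htr] at hf
      · simp only [innerA, if_pos h0, if_neg htr] at hf ⊢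
        rw [List.map_cons, ih (cnt + 1) hf]
        simp [step1, h0]
    · simp only [innerA, if_neg h0] at hf ⊢
      rw [List.map_cons, ih 0 hf]
      simp [step1, h0]

-- detection at round r on the decayed list, in terms of the original windows
lemma det_decayed (orig : List Int) (k : Int) (K : Nat)
    (hcond : ∀ c : Int, 0 ≤ c → (c + 1 > k - 1 ↔ (K : Int) ≤ c + 1)) (hK : 1 ≤ K) (r : Nat) :
    ((innerA (orig.map (decay r)) 0 k).2 = true ↔
      ∃ i : Nat, i + K ≤ orig.length ∧ ∀ s ∈ winL orig K i, 0 ≤ s ∧ s ≤ (r : Int)) := by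
  have hwin : ∀ i : Nat, ((∀ s ∈ ((orig.map (decay r)).drop i).take K, s = 0) ↔
      ∀ s ∈ winL orig K i, 0 ≤ s ∧ s ≤ (r : Int)) := by
    intro i
    rw [← List.map_drop, ← List.map_take]
    constructor
    · intro h s hs
      exact (decay_eq_zero_iff r s).1 (h (decay r s) (List.mem_map_of_mem hs))
    · intro h s hs
      rcases List.mem_map.1 hs with ⟨t, ht, rfl⟩
      exact (decay_eq_zero_iff r t).2 (h t ht)
  have h0 : (0 : Int) = ((0 : Nat) : Int) := rfl
  rw [h0, innerA_flag k K hcond hK (orig.map (decay r)) 0 (by omega)]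
  constructor
  · rintro (⟨m, hm, hz, hKm⟩ | ⟨i, hi, hz⟩)
    · refine ⟨0, by simpa using (by omega : 0 + K ≤ (orig.map (decay r)).length), ?_⟩
      apply (hwin 0).1
      intro s hs
      apply hz s
      have : ((orig.map (decay r)).drop 0).take K = (((orig.map (decay r)).take m)).take K := by
        rw [List.drop_zero, List.take_take]; congr 1; omega
      rw [this] at hs
      exact List.take_subset _ _ hs
    · exact ⟨i, by simpa using hi, (hwin i).1 hz⟩
  · rintro ⟨i, hi, hz⟩
    exact Or.inr ⟨i, by simpa using hi, (hwin i).2 hz⟩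

lemma mem_cands_iff (stones : List Int) (K : Nat) (hKn : K ≤ stones.length) (q : Int) :
    q ∈ cands stones K ↔
      ∃ i : Nat, i + K ≤ stones.length ∧ (∀ s ∈ winL stones K i, 0 ≤ s) ∧ q = wmax (winL stones K i) := by
  unfold cands
  rw [List.mem_filterMap]
  constructor
  · rintro ⟨i, hi, hq⟩
    rw [List.mem_range] at hi
    split at hq
    · rename_i hall
      refine ⟨i, by omega, ?_, by simpa using hq.symm⟩
      intro s hs
      simpa using (List.all_eq_true.1 hall s hs)
    · simp at hq
  · rintro ⟨i, hi, hall, hq⟩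
    refine ⟨i, by rw [List.mem_range]; omega, ?_⟩
    rw [if_pos (List.all_eq_true.2 (fun s hs => by simpa using hall s hs))]
    simp [hq]

lemma winL_length (stones : List Int) (K i : Nat) (h : i + K ≤ stones.length) :
    (winL stones K i).length = K := by
  unfold winL; simp; omega

lemma wmax_mem (w : List Int) (hw : w ≠ []) : wmax w ∈ w := by
  cases w with
  | nil => exact absurd rfl hw
  | cons x t => exact mem_foldl_max t x

lemma le_wmax (w : List Int) (x : Int) (hx : x ∈ w) : x ≤ wmax w := by
  cases w with
  | nil => simp at hx
  | cons y t => exact le_foldl_max_of_mem t y x hx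

-- detection ↔ some candidate is ≤ r
lemma det_iff_cand (orig : List Int) (k : Int) (K : Nat)
    (hcond : ∀ c : Int, 0 ≤ c → (c + 1 > k - 1 ↔ (K : Int) ≤ c + 1)) (hK : 1 ≤ K)
    (hKn : K ≤ orig.length) (r : Nat) :
    ((innerA (orig.map (decay r)) 0 k).2 = true ↔ ∃ q ∈ cands orig K, q ≤ (r : Int)) := by
  rw [det_decayed orig k K hcond hK r]
  constructor
  · rintro ⟨i, hi, h⟩
    have hne : winL orig K i ≠ [] := by
      have := winL_length orig K i hi
      intro hnil; rw [hnil] at this; simp at this; omega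
    refine ⟨wmax (winL orig K i), (mem_cands_iff orig K hKn _).2 ⟨i, hi, fun s hs => (h s hs).1, rfl⟩, ?_⟩
    exact (h _ (wmax_mem _ hne)).2
  · rintro ⟨q, hq, hqr⟩
    rcases (mem_cands_iff orig K hKn q).1 hq with ⟨i, hi, hgood, rfl⟩
    exact ⟨i, hi, fun s hs => ⟨hgood s hs, le_trans (le_wmax _ s hs) hqr⟩⟩

lemma loopA_eq (orig : List Int) (k : Int) (K : Nat)
    (hcond : ∀ c : Int, 0 ≤ c → (c + 1 > k - 1 ↔ (K : Int) ≤ c + 1)) (hK : 1 ≤ K)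
    (hKn : K ≤ orig.length) (W : Int)
    (hWmem : W ∈ cands orig K) (hWle : ∀ q ∈ cands orig K, W ≤ q) :
    ∀ (fuel r : Nat) (ans : Int), (r : Int) ≤ W → (W - r).toNat + 1 ≤ fuel →
      loopA fuel (orig.map (decay r)) k ans = ans + (W - r) + 1 := by
  intro fuel
  induction fuel with
  | zero => intro r ans _ hf; omega
  | succ f ih =>
    intro r ans hr hf
    by_cases hdet : (innerA (orig.map (decay r)) 0 k).2 = true
    · have hWr : W ≤ (r : Int) := by
        rcases (det_iff_cand orig k K hcond hK hKn r).1 hdet with ⟨q, hq, hqr⟩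
        exact le_trans (hWle q hq) hqr
      have : W = (r : Int) := le_antisymm hWr hr
      simp only [loopA, hdet, if_true]
      omega
    · have hflag : (innerA (orig.map (decay r)) 0 k).2 = false := by
        cases h : (innerA (orig.map (decay r)) 0 k).2
        · rfl
        · exact absurd h hdet
      have hrW : (r : Int) < W := by
        rcases lt_or_eq_of_le hr with h | h
        · exact h
        · exfalso
          apply hdet
          apply (det_iff_cand orig k K hcond hK hKn r).2
          exact ⟨W, hWmem, le_of_eq h.symm⟩
      have hstones : (innerA (orig.map (decay r)) 0 k).1 = orig.map (decay (r + 1)) := by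
        rw [innerA_stones k _ 0 hflag, List.map_map]
        exact List.map_congr_left (fun s _ => step1_decay r s)
      simp only [loopA, hflag]
      rw [if_neg (by simp), hstones]
      have := ih (r + 1) (ans + 1) (by omega) (by omega)
      rw [this]
      push_cast
      ring

-- B's run scan computes exactly A's detection flag on the r-times-decayed list
lemma goB_eq_innerA (k : Int) (r : Nat) :
    ∀ (c : List Int) (run : Int), goB k (r : Int) c run = (innerA (c.map (decay r)) run k).2 := by
  intro c
  induction c with
  | nil => intro run; simp [goB, innerA]
  | cons s rest ih =>
    intro run
    by_cases hw : 0 ≤ s ∧ s ≤ (r : Int)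
    · have hz : decay r s = 0 := (decay_eq_zero_iff r s).2 hw
      by_cases htr : run + 1 ≥ k
      · simp [goB, innerA, hz, hw, htr, show run + 1 > k - 1 by omega]
      · simp [goB, innerA, hz, hw, htr, show ¬ run + 1 > k - 1 by omega]
        exact ih (run + 1)
    · have hz : ¬ decay r s = 0 := fun h => hw ((decay_eq_zero_iff r s).1 h)
      simp only [goB, innerA, List.map_cons, if_neg hw, if_neg hz]
      exact ih 0

-- the binary search on a threshold predicate: blocked r ↔ W ≤ r
lemma bsearchB_eq (stones : List Int) (k W : Int)
    (hblock : ∀ r : Int, 0 ≤ r → (goB k r stones 0 = true ↔ W ≤ r)) :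
    ∀ (fuel : Nat) (lo hi : Int), (hi - lo).toNat < fuel → 0 ≤ lo → lo ≤ W → W ≤ hi →
      bsearchB fuel stones k lo hi = W := by
  intro fuel
  induction fuel with
  | zero => intro lo hi hf _ _ _; omega
  | succ f ih =>
    intro lo hi hf hlo0 hloW hWhi
    by_cases h : lo < hi
    · simp only [bsearchB, if_pos h]
      have hdiv : PySem.Int.floordiv (lo + hi) 2 = (lo + hi) / 2 :=
        PySem.Int.floordiv_eq_ediv_of_pos (show (0:Int) < 2 by norm_num)
      have hmidb : lo ≤ PySem.Int.floordiv (lo + hi) 2 ∧ PySem.Int.floordiv (lo + hi) 2 < hi := by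
        rw [hdiv]; omega
      by_cases hb : goB k (PySem.Int.floordiv (lo + hi) 2) stones 0 = true
      · have hWmid : W ≤ PySem.Int.floordiv (lo + hi) 2 :=
          (hblock _ (by omega)).1 hb
        simp only [hb, if_true]
        exact ih lo _ (by omega) hlo0 hloW hWmid
      · have hmidW : PySem.Int.floordiv (lo + hi) 2 < W := by
          by_contra hcon
          exact hb ((hblock _ (by omega)).2 (by omega))
        simp only [hb, if_false, Bool.false_eq_true]
        exact ih _ hi (by omega) (by omega) (by omega) hWhi
    · simp only [bsearchB, if_neg h]
      omega

-- ===== VERDICT =====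
theorem solution_spec : Claim_equal_solution := by
  unfold Claim_equal_solution
  intro stones k _ hpre
  obtain ⟨i0, hi0lt, hi0, hgood⟩ := hpre
  unfold Spec_solution
  set K := max k.toNat 1 with hKdef
  have hcond : ∀ c : Int, 0 ≤ c → (c + 1 > k - 1 ↔ (K : Int) ≤ c + 1) := by
    intro c hc; omega
  have hK : 1 ≤ K := by omega
  have hKn : K ≤ stones.length := by omega
  have hmem0 : wmax (winL stones K i0) ∈ cands stones K :=
    (mem_cands_iff stones K hKn _).2 ⟨i0, hi0, hgood, rfl⟩
  cases hc : cands stones K with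
  | nil => rw [hc] at hmem0; simp at hmem0
  | cons c t =>
    set W := t.foldl min c with hWdef
    have hWmem : W ∈ cands stones K := by rw [hc]; exact mem_foldl_min t c
    have hWle : ∀ q ∈ cands stones K, W ≤ q := by
      intro q hq; rw [hc] at hq; exact foldl_min_le_of_mem t c q hq
    obtain ⟨iw, hiw, hgw, hWeq⟩ := (mem_cands_iff stones K hKn W).1 hWmem
    have hne : winL stones K iw ≠ [] := by
      have := winL_length stones K iw hiw
      intro hnil; rw [hnil] at this; simp at this; omega
    have hmemw : wmax (winL stones K iw) ∈ winL stones K iw := wmax_mem _ hne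
    have hms : wmax (winL stones K iw) ∈ stones :=
      List.mem_of_mem_drop (List.mem_of_mem_take hmemw)
    have hW0 : 0 ≤ W := by rw [hWeq]; exact hgw _ hmemw
    have hWstone : W ≤ stones.foldl (fun a s => max a s) 0 := by
      rw [hWeq]
      exact le_foldl_max_of_mem stones 0 _ (List.mem_cons.2 (Or.inr hms))
    have hmap0 : stones.map (decay 0) = stones := by
      rw [List.map_congr_left (fun s _ => decay_zero s)]; exact List.map_id stones
    have hA := loopA_eq stones k K hcond hK hKn W hWmem hWle
      ((stones.foldl (fun a s => max a s) 0).toNat + 2) 0 (-1) (by omega) (by omega)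
    rw [hmap0] at hA
    -- blocked r ↔ W ≤ r, for r ≥ 0
    have hblock : ∀ r : Int, 0 ≤ r → (goB k r stones 0 = true ↔ W ≤ r) := by
      intro r hr
      have hrn : r = ((r.toNat : Nat) : Int) := by omega
      rw [hrn, goB_eq_innerA k r.toNat stones 0,
        det_iff_cand stones k K hcond hK hKn r.toNat]
      constructor
      · rintro ⟨q, hq, hqr⟩
        exact le_trans (hWle q hq) hqr
      · intro hWr
        exact ⟨W, hWmem, hWr⟩
    -- the upper bound of the search: max(stones)
    obtain ⟨x, xs, hst⟩ : ∃ x xs, stones = x :: xs := by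
      cases stones with
      | nil => simp at hKn; omega
      | cons a b => exact ⟨a, b, rfl⟩
    subst hst
    have hmax : (PySem.List.max? (x :: xs) (fun s => s)).getD 0 = xs.foldl max x := by
      rw [PySem.List.max?_id_cons]; rfl
    have hWhi : W ≤ xs.foldl max x := by
      rw [hWeq]
      exact le_foldl_max_of_mem xs x _ hms
    have hB : solution_alt (x :: xs) k = W := by
      unfold solution_alt
      rw [hmax]
      exact bsearchB_eq (x :: xs) k W hblock ((xs.foldl max x).toNat + 1) 0 (xs.foldl max x)
        (by omega) (by omega) hW0 hWhi
    rw [hB]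
    unfold solution
    rw [hA]
    omega
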